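-- pv_equiv track=rewrite | github.com/mmmfrieddough/minecraft-schematic-generator | schematic_generator/shape.py | insert_permutations
-- ===== SOURCE A (Python) =====
-- import itertools
--
-- def insert_permutations(sequence, elements):
--     sequence = list(sequence)
--     for num_elements in range(len(elements) + 1):
--         for element_subset in itertools.permutations(elements, num_elements):
--             for positions in itertools.combinations(range(len(sequence) + num_elements), num_elements):
--                 temp_sequence = sequence[:]
--                 for element, pos in sorted(zip(element_subset, positions), key=lambda x: x[1]):
--                     temp_sequence.insert(pos, element)
--                 yield tuple(temp_sequence)
-- ===== SOURCE B (Python) =====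
-- import itertools
--
--
-- def insert_permutations(sequence, elements):
--     seq = list(sequence)
--     n = len(seq)
--     for num_elements in range(len(elements) + 1):
--         for element_subset in itertools.permutations(elements, num_elements):
--             for positions in itertools.combinations(range(n + num_elements), num_elements):
--                 # two-pointer merge: walk the output indices once, taking either
--                 # the next inserted element (at its position) or the next item of seq
--                 result = []
--                 si = 0
--                 pi = 0
--                 for i in range(n + num_elements):
--                     if pi < num_elements and positions[pi] == i:
--                         result.append(element_subset[pi])
--                         pi += 1
--                     else:
--                         result.append(seq[si])
--                         si += 1
--                 yield tuple(result)
-- ===== Notes on version B (the rewrite author's own statement) =====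
-- stated objective: alternative
-- what changed: The inner construction of each output tuple is replaced: instead of copying the sequence and performing num_elements sequential list.insert calls on a sorted zip, B builds each tuple in one two-pointer merge pass over the output indices, taking the next inserted element when its position comes up and the next sequence item otherwise (no copy, no insert, no sort).
import Mathlib
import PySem

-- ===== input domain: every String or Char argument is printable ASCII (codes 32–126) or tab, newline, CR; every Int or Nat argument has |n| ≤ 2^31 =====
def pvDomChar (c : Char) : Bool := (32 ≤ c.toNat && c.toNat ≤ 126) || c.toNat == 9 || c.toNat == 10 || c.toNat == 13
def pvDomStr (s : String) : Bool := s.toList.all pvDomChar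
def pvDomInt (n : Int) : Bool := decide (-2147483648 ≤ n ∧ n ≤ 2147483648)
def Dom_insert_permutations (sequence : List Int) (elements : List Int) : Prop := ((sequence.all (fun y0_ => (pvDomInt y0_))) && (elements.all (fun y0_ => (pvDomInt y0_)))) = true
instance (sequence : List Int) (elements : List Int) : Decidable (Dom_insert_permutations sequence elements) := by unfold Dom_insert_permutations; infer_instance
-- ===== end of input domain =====

-- B replaces A's per-tuple copy + sorted + sequential list.insert loop with a single
-- two-pointer merge over the output indices (alternative decomposition, same outputs).

-- ===== PORT A =====
-- A (a generator) is ported as the list of its yielded tuples, in yield order.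
def insert_permutations (sequence : List Int) (elements : List Int) : List (List Int) :=
  (List.range (elements.length + 1)).flatMap (fun num_elements =>
    (PySem.List.permutations elements num_elements).flatMap (fun element_subset =>
      (PySem.List.combinations
          (PySem.List.pyRange 0 ((sequence.length : Int) + (num_elements : Int)) 1)
          num_elements).map (fun positions =>
        (PySem.List.sorted (element_subset.zip positions) (fun x => x.2)).foldl
          (fun temp_sequence ep => PySem.List.insert temp_sequence ep.2 ep.1) sequence)))

-- ===== PORT B =====
-- the 'for i in range(n + num_elements)' two-pointer loop of Source B: consume the next
-- (element, position) pair when positions[pi] == i, else copy the next item of seq.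
-- (the 'seq exhausted' completion is unreachable for the position lists B feeds it.)
def fillMerge : List Int → List Int → Int → List Int → List Int
  | e :: es, p :: ps, i, seq =>
      if p = i then e :: fillMerge es ps (i + 1) seq
      else
        match seq with
        | [] => e :: es
        | s :: ss => s :: fillMerge (e :: es) (p :: ps) (i + 1) ss
  | _, _, _, seq => seq
termination_by _ poss _ seq => (poss.length, seq.length)

def insert_permutations_alt (sequence : List Int) (elements : List Int) : List (List Int) :=
  (List.range (elements.length + 1)).flatMap (fun num_elements =>
    (PySem.List.permutations elements num_elements).flatMap (fun element_subset =>
      (PySem.List.combinations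
          (PySem.List.pyRange 0 ((sequence.length : Int) + (num_elements : Int)) 1)
          num_elements).map (fun positions =>
        fillMerge element_subset positions 0 sequence)))

-- ===== PRECONDITION & SPEC =====
def Spec_insert_permutations (sequence : List Int) (elements : List Int) (out : List (List Int)) : Prop := out = insert_permutations_alt sequence elements
instance (sequence : List Int) (elements : List Int) (out : List (List Int)) : Decidable (Spec_insert_permutations sequence elements out) := by unfold Spec_insert_permutations; infer_instance

-- ===== CLAIM (what is proved, stated in full; the proofs are below) =====
def Claim_equal_insert_permutations : Prop := ∀ (sequence : List Int) (elements : List Int), Dom_insert_permutations sequence elements → Spec_insert_permutations sequence elements (insert_permutations sequence elements)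

-- ===== LEMMAS AND PROOFS =====

lemma fillMerge_nil_subs (poss : List Int) (i : Int) (seq : List Int) :
    fillMerge [] poss i seq = seq := by
  cases poss <;> simp [fillMerge]

lemma fillMerge_nil_poss (subs : List Int) (i : Int) (seq : List Int) :
    fillMerge subs [] i seq = seq := by
  cases subs <;> simp [fillMerge]

-- walking an untouched prefix: while every pending position lies at or beyond the
-- end of the prefix `a`, fillMerge copies `a` verbatim.
lemma fillMerge_cons_eq (e : Int) (es : List Int) (p : Int) (ps : List Int) (i : Int)
    (seq : List Int) (h : p = i) :
    fillMerge (e :: es) (p :: ps) i seq = e :: fillMerge es ps (i + 1) seq := by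
  cases seq <;> simp [fillMerge, h]

lemma fillMerge_prefix : ∀ (a : List Int) (subs poss : List Int) (i : Int) (b : List Int),
    (∀ p ∈ poss, i + (a.length : Int) ≤ p) →
    fillMerge subs poss i (a ++ b) = a ++ fillMerge subs poss (i + (a.length : Int)) b := by
  intro a
  induction a with
  | nil => intro subs poss i b _; simp
  | cons s ss ih =>
    intro subs poss i b h
    match subs, poss with
    | [], ps => simp [fillMerge_nil_subs]
    | e :: es, [] => simp [fillMerge_nil_poss]
    | e :: es, p :: ps =>
      have hp : i + ((ss.length : Int) + 1) ≤ p := by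
        have := h p (List.mem_cons_self ..)
        simp only [List.length_cons] at this
        push_cast at this
        omega
      have hne : ¬ (p = i) := by omega
      have h' : ∀ q ∈ p :: ps, (i + 1) + (ss.length : Int) ≤ q := by
        intro q hq
        have := h q hq
        simp only [List.length_cons] at this
        push_cast at this
        omega
      have harith : (i + 1) + (ss.length : Int) = i + ((s :: ss).length : Int) := by
        simp only [List.length_cons]
        push_cast
        ring
      calc fillMerge (e :: es) (p :: ps) i ((s :: ss) ++ b)
          = s :: fillMerge (e :: es) (p :: ps) (i + 1) (ss ++ b) := by
            simp only [List.cons_append, fillMerge, if_neg hne]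
        _ = s :: (ss ++ fillMerge (e :: es) (p :: ps) ((i + 1) + (ss.length : Int)) b) := by
            rw [ih _ _ _ _ h']
        _ = (s :: ss) ++ fillMerge (e :: es) (p :: ps) (i + ((s :: ss).length : Int)) b := by
            rw [harith]; simp

-- strictly increasing positions all below m: the j-th one is at most m - length + j.
lemma posUpperBound : ∀ (ps : List Int) (m : Int), ps.Pairwise (· < ·) →
    (∀ p ∈ ps, p < m) → ∀ j (hj : j < ps.length), ps[j] + (ps.length : Int) ≤ m + (j : Int) := by
  intro ps
  induction ps with
  | nil => intro m _ _ j hj; simp at hj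
  | cons p t ih =>
    intro m hpw hlt j hj
    have hpwt : t.Pairwise (· < ·) := hpw.of_cons
    have hltt : ∀ q ∈ t, q < m := fun q hq => hlt q (List.mem_cons_of_mem _ hq)
    match j with
    | 0 =>
      simp only [List.getElem_cons_zero]
      match t with
      | [] =>
        have := hlt p (List.mem_cons_self ..)
        simp only [List.length_cons, List.length_nil]
        push_cast
        omega
      | q :: t' =>
        have h0 := ih m hpwt hltt 0 (by simp)
        have hpq : p < q := (List.pairwise_cons.mp hpw).1 q (List.mem_cons_self ..)
        simp only [List.getElem_cons_zero, List.length_cons] at h0 ⊢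
        push_cast at h0 ⊢
        omega
    | j + 1 =>
      have hj' : j < t.length := by simpa using hj
      have := ih m hpwt hltt j hj'
      simp only [List.getElem_cons_succ, List.length_cons] at this ⊢
      push_cast at this ⊢
      omega

-- the heart of the equivalence: inserting at strictly increasing, in-bounds positions
-- (A's sequential list.insert loop) builds exactly the two-pointer merge of B.
lemma foldl_insert_eq_fillMerge : ∀ (subs poss seq : List Int),
    subs.length = poss.length →
    poss.Pairwise (· < ·) →
    (∀ p ∈ poss, 0 ≤ p) →
    (∀ j (hj : j < poss.length), poss[j] ≤ (seq.length : Int) + (j : Int)) →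
    (subs.zip poss).foldl (fun acc ep => PySem.List.insert acc ep.2 ep.1) seq
      = fillMerge subs poss 0 seq := by
  intro subs
  induction subs with
  | nil => intro poss seq _ _ _ _; simp [fillMerge_nil_subs]
  | cons e es ih =>
    intro poss seq hlen hpw hnn hub
    match poss with
    | [] => simp at hlen
    | p :: ps =>
      have h0 : 0 ≤ p := hnn p (List.mem_cons_self ..)
      have hle : p ≤ (seq.length : Int) := by
        have := hub 0 (by simp)
        simpa using this
      set k := p.toNat with hk
      have hpk : (k : Int) = p := Int.toNat_of_nonneg h0
      have hkle : k ≤ seq.length := by omega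
      have hins : PySem.List.insert seq p e = seq.take k ++ e :: seq.drop k := by
        rw [← hpk, PySem.List.insert_natCast _ _ _ hkle]
      have hgtp : ∀ q ∈ ps, p < q := (List.pairwise_cons.mp hpw).1
      -- the recursive call of A's loop, via the induction hypothesis
      have hIH : (es.zip ps).foldl (fun acc ep => PySem.List.insert acc ep.2 ep.1)
            (seq.take k ++ e :: seq.drop k) = fillMerge es ps 0 (seq.take k ++ e :: seq.drop k) := by
        apply ih
        · simpa using hlen
        · exact hpw.of_cons
        · exact fun q hq => hnn q (List.mem_cons_of_mem _ hq)
        · intro j hj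
          have := hub (j + 1) (by simpa using Nat.succ_lt_succ hj)
          simp only [List.getElem_cons_succ] at this
          have hlen' : (seq.take k ++ e :: seq.drop k).length = seq.length + 1 := by
            simp
          rw [hlen']
          push_cast at this ⊢
          omega
      have hA : (seq.take k).length = k := by simp [hkle]
      -- B's side, split at the insertion point
      have hsplit : seq = seq.take k ++ seq.drop k := (List.take_append_drop k seq).symm
      have hright : fillMerge (e :: es) (p :: ps) 0 seq
          = seq.take k ++ (e :: fillMerge es ps ((k : Int) + 1) (seq.drop k)) := by
        conv_lhs => rw [hsplit]
        rw [fillMerge_prefix (seq.take k) (e :: es) (p :: ps) 0 (seq.drop k)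
          (by intro q hq
              rcases List.mem_cons.mp hq with h | h
              · subst h; rw [hA]; omega
              · have := hgtp q h; rw [hA]; omega)]
        rw [hA]
        rw [show (0 : Int) + (k : Int) = (k : Int) by ring]
        rw [fillMerge_cons_eq _ _ _ _ _ _ (show p = (k : Int) by omega)]
      -- A's side: after the first insert, the remaining inserts leave take k ++ [e] alone
      have hleft : fillMerge es ps 0 (seq.take k ++ e :: seq.drop k)
          = seq.take k ++ (e :: fillMerge es ps ((k : Int) + 1) (seq.drop k)) := by
        have hlen2 : (((seq.take k ++ [e]).length : Nat) : Int) = (k : Int) + 1 := by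
          simp [hA]
        calc fillMerge es ps 0 (seq.take k ++ e :: seq.drop k)
            = fillMerge es ps 0 ((seq.take k ++ [e]) ++ seq.drop k) := by simp
          _ = (seq.take k ++ [e]) ++ fillMerge es ps (0 + ((seq.take k ++ [e]).length : Int)) (seq.drop k) := by
              apply fillMerge_prefix
              intro q hq
              have := hgtp q hq
              rw [hlen2]
              omega
          _ = seq.take k ++ (e :: fillMerge es ps ((k : Int) + 1) (seq.drop k)) := by
              rw [hlen2, show (0 : Int) + ((k : Int) + 1) = (k : Int) + 1 by ring]
              simp
      calc ((e :: es).zip (p :: ps)).foldl (fun acc ep => PySem.List.insert acc ep.2 ep.1) seq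
          = (es.zip ps).foldl (fun acc ep => PySem.List.insert acc ep.2 ep.1)
              (PySem.List.insert seq p e) := by simp [List.zip_cons_cons]
        _ = fillMerge es ps 0 (seq.take k ++ e :: seq.drop k) := by rw [hins, hIH]
        _ = fillMerge (e :: es) (p :: ps) 0 seq := by rw [hleft, hright]

-- per-item equality, with the facts supplied by combinations-of-range membership
lemma item_eq (sequence : List Int) (num_elements : Nat) (element_subset positions : List Int)
    (hlen : element_subset.length = num_elements)
    (hpos : positions ∈ PySem.List.combinations
        (PySem.List.pyRange 0 ((sequence.length : Int) + (num_elements : Int)) 1) num_elements) :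
    (PySem.List.sorted (element_subset.zip positions) (fun x => x.2)).foldl
        (fun temp_sequence ep => PySem.List.insert temp_sequence ep.2 ep.1) sequence
      = fillMerge element_subset positions 0 sequence := by
  obtain ⟨hsub, hplen⟩ := (PySem.List.mem_combinations_iff _ _ _).mp hpos
  have hm : ((sequence.length : Int) + (num_elements : Int))
      = ((sequence.length + num_elements : Nat) : Int) := by push_cast; ring
  have hpwR : (PySem.List.pyRange 0 ((sequence.length : Int) + (num_elements : Int)) 1).Pairwise (· < ·) := by
    rw [hm, PySem.List.pyRange_zero_natCast]
    exact (List.pairwise_map.mpr (List.pairwise_lt_range.imp (by intro a b h; exact_mod_cast h)))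
  have hpw : positions.Pairwise (· < ·) := hpwR.sublist hsub
  have hmemR : ∀ p ∈ positions, 0 ≤ p ∧ p < (sequence.length : Int) + (num_elements : Int) := by
    intro p hp
    have := PySem.List.mem_pyRange_one.mp (hsub.subset hp)
    exact this
  have hnn : ∀ p ∈ positions, 0 ≤ p := fun p hp => (hmemR p hp).1
  have hub : ∀ j (hj : j < positions.length), positions[j] ≤ (sequence.length : Int) + (j : Int) := by
    intro j hj
    have := posUpperBound positions ((sequence.length : Int) + (num_elements : Int)) hpw
      (fun p hp => (hmemR p hp).2) j hj
    rw [hplen] at this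
    omega
  have hzlen : element_subset.length = positions.length := by rw [hlen, hplen]
  have hzpw : (element_subset.zip positions).Pairwise (fun a b => a.2 < b.2) := by
    apply List.pairwise_map.mp
    rw [List.map_snd_zip (by omega)]
    exact hpw
  rw [PySem.List.sorted_eq_of_perm_of_pairwise_lt _ _ _ (List.Perm.refl _) hzpw]
  exact foldl_insert_eq_fillMerge element_subset positions sequence hzlen hpw hnn hub

-- ===== VERDICT (by name: the statement is the Claim_ definition above) =====
theorem insert_permutations_spec : Claim_equal_insert_permutations := by
  intro sequence elements _
  unfold Spec_insert_permutations insert_permutations insert_permutations_alt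
  apply List.flatMap_congr
  intro num_elements _
  apply List.flatMap_congr
  intro element_subset hsub
  apply List.map_congr_left
  intro positions hpos
  exact item_eq sequence num_elements element_subset positions
    (PySem.List.length_of_mem_permutations hsub) hpos
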